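-- pv_equiv track=rewrite | github.com/estraviz/codewars | 7_kyu/String prefix and suffix/solve.py | solve
-- ===== SOURCE A (Python) =====
-- def solve(st):
--     ind = len(st) // 2
--     while ind > 0:
--         if st[:ind] == st[-ind:]:
--             return ind
--         ind -= 1
--     else:
--         return 0
-- ===== SOURCE B (Python) =====
-- def solve(st):
--     n = len(st)
--     if n == 0:
--         return 0
--     # KMP prefix function: pi[i] = length of longest proper border of st[:i+1]
--     pi = [0] * n
--     for i in range(1, n):
--         j = pi[i - 1]
--         while j > 0 and st[i] != st[j]:
--             j = pi[j - 1]
--         if st[i] == st[j]: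
--             j += 1
--         pi[i] = j
--     # follow the border chain down to the largest border of length <= n // 2
--     half = n // 2
--     j = pi[n - 1]
--     while j > half:
--         j = pi[j - 1]
--     return j
-- ===== Notes on version B (the rewrite author's own statement) =====
-- stated objective: faster
-- what changed: Replaced the quadratic downward scan that compares st[:ind] with st[-ind:] for every candidate length by the KMP prefix function followed by a walk down the border chain to the largest border of length at most n//2.
import Mathlib
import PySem

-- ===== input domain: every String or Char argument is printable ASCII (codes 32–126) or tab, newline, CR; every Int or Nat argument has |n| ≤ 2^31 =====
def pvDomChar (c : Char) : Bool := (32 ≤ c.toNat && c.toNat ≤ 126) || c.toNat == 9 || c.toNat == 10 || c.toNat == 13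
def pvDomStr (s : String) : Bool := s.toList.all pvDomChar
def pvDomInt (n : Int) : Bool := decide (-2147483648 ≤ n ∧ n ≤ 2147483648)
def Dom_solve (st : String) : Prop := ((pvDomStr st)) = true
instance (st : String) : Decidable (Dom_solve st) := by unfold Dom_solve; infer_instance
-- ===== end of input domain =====

-- B replaces A's quadratic downward slice-comparison scan by the linear KMP prefix
-- function plus a walk down the border chain (objective: faster, asymptotic).

-- ===== PORT A =====
-- while ind > 0: if st[:ind] == st[-ind:]: return ind; ind -= 1  — structural recursion on ind
def solveLoopA (s : List Char) : Nat → Int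
  | 0 => 0
  | ind + 1 =>
      if PySem.List.slice s none (some ((ind + 1 : Nat) : Int)) =
         PySem.List.slice s (some (-((ind + 1 : Nat) : Int))) none
      then ((ind + 1 : Nat) : Int)
      else solveLoopA s ind

-- ind = len(st) // 2 (nonnegative, so Python's // is Nat division)
def solve (st : String) : Int := solveLoopA st.toList (st.toList.length / 2)

-- ===== PORT B =====
-- inner 'while j > 0 and st[i] != st[j]: j = pi[j-1]'; fuel (initially j) only makes the
-- loop total: each real step has pi[j-1] < j.  Indices are provably in range, so getD.
def kmpFall (s : List Char) (pi : List Nat) (c : Char) : Nat → Nat → Nat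
  | 0, j => j
  | fuel + 1, j =>
      if 0 < j ∧ c ≠ s.getD j ' ' then kmpFall s pi c fuel (pi.getD (j - 1) 0) else j

-- for i in range(1, n): ... pi[i] = j   (pi built left to right, pi[0] = 0)
def buildPi (s : List Char) : List Nat :=
  (List.range' 1 (s.length - 1)).foldl
    (fun pi i =>
      let j0 := pi.getD (i - 1) 0
      let j1 := kmpFall s pi (s.getD i ' ') j0 j0
      let j2 := if s.getD i ' ' = s.getD j1 ' ' then j1 + 1 else j1
      pi ++ [j2]) [0]

-- j = pi[n-1]; while j > half: j = pi[j-1]  — fuel (initially j) only makes it total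
def descend (pi : List Nat) (half : Nat) : Nat → Nat → Nat
  | 0, j => j
  | fuel + 1, j => if half < j then descend pi half fuel (pi.getD (j - 1) 0) else j

def solve_alt (st : String) : Int :=
  let s := st.toList
  let n := s.length
  if n = 0 then 0
  else
    let pi := buildPi s
    let j0 := pi.getD (n - 1) 0
    ((descend pi (n / 2) j0 j0 : Nat) : Int)

-- ===== PRECONDITION & SPEC =====
def Spec_solve (st : String) (out : Int) : Prop := out = solve_alt st
instance (st : String) (out : Int) : Decidable (Spec_solve st out) := by unfold Spec_solve; infer_instance

-- ===== CLAIM (what is proved, stated in full; the proofs are below) =====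
def Claim_equal_solve : Prop := ∀ (st : String), Dom_solve st → Spec_solve st (solve st)

-- ===== LEMMAS AND PROOFS =====

-- k is a (proper) border of t: a prefix of length k < |t| that is also a suffix
abbrev Bord (t : List Char) (k : Nat) : Prop := k < t.length ∧ t.take k <:+ t

-- longest proper border length of t (0 for t = [])
def maxB (t : List Char) : Nat := Nat.findGreatest (fun k => Bord t k) (t.length - 1)

lemma bord_zero (t : List Char) (h : t ≠ []) : Bord t 0 := by
  constructor
  · exact List.length_pos_iff.mpr h
  · simp

lemma maxB_lt (t : List Char) (h : t ≠ []) : maxB t < t.length := by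
  have h1 : maxB t ≤ t.length - 1 := Nat.findGreatest_le _
  have h2 : 0 < t.length := List.length_pos_iff.mpr h
  omega

lemma maxB_bord (t : List Char) (h : t ≠ []) : Bord t (maxB t) := by
  by_cases h0 : maxB t = 0
  · rw [h0]; exact bord_zero t h
  · exact Nat.findGreatest_of_ne_zero rfl h0

lemma maxB_is_max {t : List Char} {b : Nat} (hb : Bord t b) : b ≤ maxB t :=
  Nat.le_findGreatest (by have := hb.1; omega) hb

lemma bord_take {t : List Char} {b j : Nat} (hb : Bord t b) (hj : Bord t j)
    (hlt : b < j) : Bord (t.take j) b := by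
  obtain ⟨hbl, hbs⟩ := hb
  obtain ⟨hjl, hjs⟩ := hj
  constructor
  · simp; omega
  · rw [List.take_take, Nat.min_eq_left (le_of_lt hlt)]
    exact List.suffix_of_suffix_length_le hbs hjs (by simp; omega)

lemma bord_trans {t : List Char} {b j : Nat} (hj : Bord t j)
    (hb : Bord (t.take j) b) : Bord t b := by
  obtain ⟨hjl, hjs⟩ := hj
  obtain ⟨hbl, hbs⟩ := hb
  have hbj : b < j := by simpa using lt_of_lt_of_le hbl (by simp)
  constructor
  · omega
  · have : (t.take j).take b = t.take b := by
      rw [List.take_take, Nat.min_eq_left (le_of_lt hbj)]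
    exact (this ▸ hbs).trans hjs

lemma snoc_suffix_snoc (w u : List Char) (x a : Char) :
    w ++ [x] <:+ u ++ [a] ↔ w <:+ u ∧ x = a := by
  rw [← List.reverse_prefix]
  simp only [List.reverse_append, List.reverse_singleton, List.singleton_append,
    List.cons_prefix_cons, List.reverse_prefix]
  tauto

-- extending a border by one matching character
lemma bord_snoc (u : List Char) (a : Char) (c : Nat) (hc : c < u.length) :
    Bord (u ++ [a]) (c + 1) ↔ Bord u c ∧ u[c] = a := by
  unfold Bord
  have h1 : (u ++ [a]).take (c + 1) = u.take c ++ [u[c]] := by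
    rw [List.take_append_of_le_length (by omega), List.take_succ_eq_append_getElem hc]
  rw [h1, snoc_suffix_snoc]
  simp only [List.length_append, List.length_singleton]
  constructor
  · rintro ⟨-, h2, h3⟩; exact ⟨⟨hc, h2⟩, h3⟩
  · rintro ⟨⟨-, h2⟩, h3⟩; exact ⟨by omega, h2, h3⟩

-- the inner while loop of the prefix-function computation: from a border j of t = s.take m
-- below which nothing larger can match, it finds the largest border whose next char matches
lemma fall_spec (s : List Char) (pi : List Nat) (m : Nat) (hmn : m ≤ s.length)
    (hpi : ∀ k, k < m → pi.getD k 0 = maxB (s.take (k + 1))) :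
    ∀ fuel j, j ≤ fuel → Bord (s.take m) j →
      (∀ b, Bord (s.take m) b → j < b → s.getD b ' ' ≠ s.getD m ' ') →
      Bord (s.take m) (kmpFall s pi (s.getD m ' ') fuel j) ∧
      (∀ b, Bord (s.take m) b → kmpFall s pi (s.getD m ' ') fuel j < b →
        s.getD b ' ' ≠ s.getD m ' ') ∧
      (kmpFall s pi (s.getD m ' ') fuel j = 0 ∨
        s.getD (kmpFall s pi (s.getD m ' ') fuel j) ' ' = s.getD m ' ') := by
  have hlen : (s.take m).length = m := by simp; omega
  intro fuel
  induction fuel with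
  | zero =>
      intro j hj hbord hexcl
      interval_cases j
      exact ⟨hbord, hexcl, Or.inl rfl⟩
  | succ fuel ih =>
      intro j hj hbord hexcl
      by_cases hcond : 0 < j ∧ s.getD m ' ' ≠ s.getD j ' '
      · have hstep : kmpFall s pi (s.getD m ' ') (fuel + 1) j
            = kmpFall s pi (s.getD m ' ') fuel (pi.getD (j - 1) 0) := by
          simp only [kmpFall, if_pos hcond]
        have hjm : j < m := by have := hbord.1; omega
        have hpij : pi.getD (j - 1) 0 = maxB (s.take j) := by
          have := hpi (j - 1) (by omega)
          rwa [Nat.sub_add_cancel hcond.1] at this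
        have htj : s.take j = (s.take m).take j := by
          rw [List.take_take, Nat.min_eq_left (le_of_lt hjm)]
        have htjne : s.take j ≠ [] := by
          have : (s.take j).length = j := by simp; omega
          intro h; rw [h] at this; simp at this; omega
        have hlt : maxB (s.take j) < j := by
          have := maxB_lt (s.take j) htjne
          have hl : (s.take j).length = j := by simp; omega
          omega
        rw [hstep, hpij]
        apply ih
        · omega
        · exact bord_trans hbord (by rw [← htj]; exact maxB_bord _ htjne)
        · intro b hb hgt
          rcases lt_trichotomy b j with hbj | hbj | hbj
          · exfalso
            have : b ≤ maxB (s.take j) := by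
              apply maxB_is_max
              rw [htj]; exact bord_take hb hbord hbj
            omega
          · subst hbj; exact fun h => hcond.2 h.symm
          · exact hexcl b hb hbj
      · have : kmpFall s pi (s.getD m ' ') (fuel + 1) j = j := by
          simp only [kmpFall, if_neg hcond]
        rw [this]
        refine ⟨hbord, hexcl, ?_⟩
        by_cases h0 : j = 0
        · exact Or.inl h0
        · right
          by_contra hne
          exact hcond ⟨Nat.pos_of_ne_zero h0, fun h => hne h.symm⟩

-- findGreatest only looks at positive arguments up to the bound
lemma fg_congr (P Q : Nat → Prop) [DecidablePred P] [DecidablePred Q] :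
    ∀ m, (∀ k, 0 < k → k ≤ m → (P k ↔ Q k)) →
      Nat.findGreatest P m = Nat.findGreatest Q m := by
  intro m
  induction m with
  | zero => intro _; rfl
  | succ m ih =>
      intro h
      rw [Nat.findGreatest_succ, Nat.findGreatest_succ,
        if_congr (h (m + 1) (by omega) le_rfl) rfl (ih fun k hk hk' => h k hk (by omega))]

-- one step of the pi-building fold computes the longest proper border of the next prefix
lemma buildPi_step (s : List Char) (pi : List Nat) (i : Nat) (hi : 0 < i) (hin : i < s.length)
    (hlen : pi.length = i)
    (hpi : ∀ k, k < i → pi.getD k 0 = maxB (s.take (k + 1))) :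
    (if s.getD i ' ' =
        s.getD (kmpFall s pi (s.getD i ' ') (pi.getD (i - 1) 0) (pi.getD (i - 1) 0)) ' '
     then kmpFall s pi (s.getD i ' ') (pi.getD (i - 1) 0) (pi.getD (i - 1) 0) + 1
     else kmpFall s pi (s.getD i ' ') (pi.getD (i - 1) 0) (pi.getD (i - 1) 0))
      = maxB (s.take (i + 1)) := by
  have hj0 : pi.getD (i - 1) 0 = maxB (s.take i) := by
    have := hpi (i - 1) (by omega)
    rwa [Nat.sub_add_cancel hi] at this
  have htne : s.take i ≠ [] := by
    have : (s.take i).length = i := by simp; omega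
    intro h; rw [h] at this; simp at this; omega
  have hti : (s.take i).length = i := by simp; omega
  obtain ⟨hb1, hexcl1, hor1⟩ :=
    fall_spec s pi i (le_of_lt hin) hpi (pi.getD (i - 1) 0) (pi.getD (i - 1) 0) le_rfl
      (hj0 ▸ maxB_bord _ htne)
      (fun b hb hgt => absurd (maxB_is_max hb) (by rw [hj0] at hgt; omega))
  set j1 := kmpFall s pi (s.getD i ' ') (pi.getD (i - 1) 0) (pi.getD (i - 1) 0) with hj1def
  have hj1i : j1 < i := by have := hb1.1; rw [hti] at this; exact this
  have hsucc : s.take (i + 1) = s.take i ++ [s[i]] := List.take_succ_eq_append_getElem hin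
  have hmaxlen : (s.take (i + 1)).length - 1 = i := by rw [List.length_take]; omega
  have hgd : ∀ (k : Nat) (hk : k < s.length), s.getD k ' ' = s[k]'hk :=
    fun k hk => List.getD_eq_getElem s ' ' hk
  by_cases hmatch : s.getD i ' ' = s.getD j1 ' '
  · rw [if_pos hmatch]
    unfold maxB
    rw [hmaxlen]
    symm
    apply (Nat.findGreatest_eq_iff).mpr
    refine ⟨by omega, fun _ => ?_, fun k hk1 hk2 => ?_⟩
    · rw [hsucc]
      apply (bord_snoc _ _ j1 (by omega)).mpr
      refine ⟨hb1, ?_⟩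
      have : (s.take i)[j1]'(by omega) = s[j1]'(by omega) := List.getElem_take
      rw [this, ← hgd j1 (by omega), ← hgd i hin]
      exact hmatch.symm
    · intro hbord
      obtain ⟨c, rfl⟩ : ∃ c, k = c + 1 := ⟨k - 1, by omega⟩
      rw [hsucc] at hbord
      obtain ⟨hbc, hc⟩ := (bord_snoc _ _ c (by omega)).mp hbord
      apply hexcl1 c hbc (by omega)
      have : (s.take i)[c]'(by omega) = s[c]'(by omega) := List.getElem_take
      rw [hgd c (by omega), ← this, hc, ← hgd i hin]
  · rw [if_neg hmatch]
    have hj10 : j1 = 0 := by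
      rcases hor1 with h | h
      · exact h
      · exact absurd h.symm hmatch
    rw [hj10]
    unfold maxB
    rw [hmaxlen]
    symm
    apply (Nat.findGreatest_eq_iff).mpr
    refine ⟨by omega, by simp, fun k hk1 hk2 => ?_⟩
    intro hbord
    obtain ⟨c, rfl⟩ : ∃ c, k = c + 1 := ⟨k - 1, by omega⟩
    rw [hsucc] at hbord
    obtain ⟨hbc, hc⟩ := (bord_snoc _ _ c (by omega)).mp hbord
    have hceq : s.getD c ' ' = s.getD i ' ' := by
      have : (s.take i)[c]'(by omega) = s[c]'(by omega) := List.getElem_take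
      rw [hgd c (by omega), ← this, hc, ← hgd i hin]
    rcases Nat.eq_zero_or_pos c with hc0 | hc0
    · subst hc0
      exact hmatch (by rw [hj10]; exact hceq.symm)
    · exact hexcl1 c hbc (by omega) hceq

-- the fold that builds pi is correct on every prefix
lemma buildPi_inv (s : List Char) (hs : s ≠ []) : ∀ m, m ≤ s.length - 1 →
    ((List.range' 1 m).foldl
      (fun pi i =>
        let j0 := pi.getD (i - 1) 0
        let j1 := kmpFall s pi (s.getD i ' ') j0 j0
        let j2 := if s.getD i ' ' = s.getD j1 ' ' then j1 + 1 else j1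
        pi ++ [j2]) [0]).length = m + 1 ∧
    ∀ k, k ≤ m →
      ((List.range' 1 m).foldl
        (fun pi i =>
          let j0 := pi.getD (i - 1) 0
          let j1 := kmpFall s pi (s.getD i ' ') j0 j0
          let j2 := if s.getD i ' ' = s.getD j1 ' ' then j1 + 1 else j1
          pi ++ [j2]) [0]).getD k 0 = maxB (s.take (k + 1)) := by
  have hn : 0 < s.length := List.length_pos_iff.mpr hs
  intro m
  induction m with
  | zero =>
      intro _
      refine ⟨rfl, fun k hk => ?_⟩
      interval_cases k
      simp only [List.range'_zero, List.foldl_nil, List.getD]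
      unfold maxB
      have h1 : (s.take 1).length - 1 = 0 := by rw [List.length_take]; omega
      rw [h1]
      rfl
  | succ m ih =>
      intro hm
      obtain ⟨ihlen, ihval⟩ := ih (by omega)
      rw [List.range'_1_concat, List.foldl_append]
      set pim := (List.range' 1 m).foldl
        (fun pi i =>
          let j0 := pi.getD (i - 1) 0
          let j1 := kmpFall s pi (s.getD i ' ') j0 j0
          let j2 := if s.getD i ' ' = s.getD j1 ' ' then j1 + 1 else j1
          pi ++ [j2]) [0] with hpim
      simp only [List.foldl_cons, List.foldl_nil]
      have hstep := buildPi_step s pim (1 + m) (by omega) (by omega)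
        (by rw [ihlen]; omega) (fun k hk => ihval k (by omega))
      have h1m : 1 + m - 1 = m := by omega
      constructor
      · simp [ihlen]
      · intro k hk
        rcases Nat.lt_or_ge k (m + 1) with hk' | hk'
        · rw [List.getD_append _ _ _ _ (by omega)]
          exact ihval k (by omega)
        · have hkm : k = m + 1 := by omega
          subst hkm
          have hget : ∀ x : Nat, (pim ++ [x]).getD (m + 1) 0 = x := by
            intro x
            have h : m + 1 = pim.length := by omega
            rw [h, List.getD_append_right _ _ _ _ le_rfl]
            simp
          rw [hget]
          simpa [h1m, Nat.add_comm 1 m] using hstep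

-- the border-chain descent returns the longest border of length at most half
lemma descend_spec (s : List Char) (pi : List Nat)
    (hpi : ∀ k, k < s.length → pi.getD k 0 = maxB (s.take (k + 1))) (half : Nat) :
    ∀ fuel j, j ≤ fuel → Bord s j → (∀ b, Bord s b → b ≤ half → b ≤ j) →
      descend pi half fuel j = Nat.findGreatest (fun k => Bord s k) half := by
  intro fuel
  induction fuel with
  | zero =>
      intro j hj hbord hinv
      interval_cases j
      rw [show descend pi half 0 0 = 0 from rfl]
      symm
      apply (Nat.findGreatest_eq_iff).mpr
      exact ⟨by omega, by simp, fun k hk1 hk2 h => by have := hinv k h (by omega); omega⟩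
  | succ fuel ih =>
      intro j hj hbord hinv
      by_cases hcond : half < j
      · have hstep : descend pi half (fuel + 1) j = descend pi half fuel (pi.getD (j - 1) 0) := by
          simp only [descend, if_pos hcond]
        have hjn : j < s.length := hbord.1
        have hj0 : 0 < j := by omega
        have hpij : pi.getD (j - 1) 0 = maxB (s.take j) := by
          have := hpi (j - 1) (by omega)
          rwa [Nat.sub_add_cancel hj0] at this
        have htjne : s.take j ≠ [] := by
          have : (s.take j).length = j := by simp; omega
          intro h; rw [h] at this; simp at this; omega
        have hlt : maxB (s.take j) < j := by
          have := maxB_lt (s.take j) htjne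
          have hl : (s.take j).length = j := by simp; omega
          omega
        rw [hstep, hpij]
        apply ih
        · omega
        · have := maxB_bord (s.take j) htjne
          have hsj : s.take j = s.take j := rfl
          exact bord_trans (t := s) (j := j) hbord (by simpa using this)
        · intro b hb hbh
          apply maxB_is_max
          exact bord_take hb hbord (by omega)
      · have : descend pi half (fuel + 1) j = j := by
          simp only [descend, if_neg hcond]
        rw [this]
        symm
        apply (Nat.findGreatest_eq_iff).mpr
        refine ⟨by omega, fun h0 => hbord, fun k hk1 hk2 h => ?_⟩
        have := hinv k h hk2
        omega

-- A's downward loop is findGreatest of the suffix test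
lemma solveLoopA_eq (s : List Char) : ∀ m, m ≤ s.length →
    solveLoopA s m = ((Nat.findGreatest (fun k => s.take k <:+ s) m : Nat) : Int) := by
  intro m
  induction m with
  | zero => intro _; rfl
  | succ m ih =>
      intro hm
      have hcond : (PySem.List.slice s none (some ((m + 1 : Nat) : Int)) =
          PySem.List.slice s (some (-((m + 1 : Nat) : Int))) none) ↔
          s.take (m + 1) <:+ s := by
        rw [PySem.List.slice_to_natCast, PySem.List.slice_from_neg_natCast s (m + 1) (by omega),
          List.suffix_iff_eq_drop]
        have : (s.take (m + 1)).length = m + 1 := by simp; omega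
        rw [this]
      rw [Nat.findGreatest_succ]
      simp only [solveLoopA]
      rw [if_congr hcond rfl rfl]
      split_ifs with h
      · rfl
      · exact ih (by omega)

-- ===== VERDICT (by name: the statement is the Claim_ definition above) =====
theorem solve_spec : Claim_equal_solve := by
  unfold Claim_equal_solve
  intro st _
  unfold Spec_solve solve solve_alt
  set s := st.toList with hs
  by_cases hn : s.length = 0
  · have hnil : s = [] := List.length_eq_zero_iff.mp hn
    rw [hnil]
    rfl
  · have hn1 : 0 < s.length := Nat.pos_of_ne_zero hn
    have hsne : s ≠ [] := by intro h; rw [h] at hn1; simp at hn1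
    simp only [if_neg hn]
    obtain ⟨hlen, hval⟩ := buildPi_inv s hsne (s.length - 1) le_rfl
    have hpi : ∀ k, k < s.length → (buildPi s).getD k 0 = maxB (s.take (k + 1)) := by
      intro k hk
      unfold buildPi
      exact hval k (by omega)
    have hj0 : (buildPi s).getD (s.length - 1) 0 = maxB s := by
      rw [hpi (s.length - 1) (by omega), Nat.sub_add_cancel hn1, List.take_length]
    have hdesc := descend_spec s (buildPi s) hpi (s.length / 2)
      ((buildPi s).getD (s.length - 1) 0) ((buildPi s).getD (s.length - 1) 0) le_rfl
      (hj0 ▸ maxB_bord s hsne) (fun b hb _ => hj0 ▸ maxB_is_max hb)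
    rw [hdesc]
    rw [solveLoopA_eq s (s.length / 2) (Nat.div_le_self _ _)]
    congr 1
    apply fg_congr
    intro k hk0 hk
    have hkn : k < s.length := by
      have : s.length / 2 < s.length := Nat.div_lt_self hn1 (by omega)
      omega
    unfold Bord
    constructor
    · intro h; exact ⟨hkn, h⟩
    · intro h; exact h.2
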